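-- pv_equiv track=rewrite | github.com/JakubBilski/tonations-recognition | src/key_recognition.py | key_to_scale
-- ===== SOURCE A (Python) =====
-- def key_to_scale(key, kind):
--     if kind == 'major':
--         return [note % 12
--                 for note in
--                 [key, key+2, key+4, key+5, key+7, key+9, key+11]]
--     return [note % 12
--             for note in
--             [key, key+2, key+3, key+5, key+7, key+8, key+11]]
-- ===== SOURCE B (Python) =====
-- def key_to_scale(key, kind):
--     steps = [2, 2, 1, 2, 2, 2] if kind == 'major' else [2, 1, 2, 2, 1, 3]
--     running = key
--     scale = [running % 12]
--     for step in steps: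
--         running += step
--         scale.append(running % 12)
--     return scale
-- ===== Notes on version B (the rewrite author's own statement) =====
-- stated objective: alternative
-- what changed: Replaces the hard-coded absolute-offset lists with a step-interval pattern walked by an accumulator loop (cumulative sums), appending running % 12 at each step.
import Mathlib
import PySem

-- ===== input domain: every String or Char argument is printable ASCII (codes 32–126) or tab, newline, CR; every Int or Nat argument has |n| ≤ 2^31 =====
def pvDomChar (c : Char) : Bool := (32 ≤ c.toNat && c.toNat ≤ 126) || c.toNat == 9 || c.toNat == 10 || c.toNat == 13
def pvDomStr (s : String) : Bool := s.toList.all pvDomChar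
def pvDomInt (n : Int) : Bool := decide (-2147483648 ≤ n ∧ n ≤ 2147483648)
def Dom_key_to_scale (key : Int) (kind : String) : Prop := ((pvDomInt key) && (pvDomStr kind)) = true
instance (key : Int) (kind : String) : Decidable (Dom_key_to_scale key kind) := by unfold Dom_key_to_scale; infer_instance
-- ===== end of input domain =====

-- B replaces A's hard-coded absolute-offset lists with a step-interval pattern
-- accumulated by a running sum (alternative decomposition, same cost).

-- ===== PORT A =====
def key_to_scale (key : Int) (kind : String) : List Int :=
  if kind == "major" then
    [key, key+2, key+4, key+5, key+7, key+9, key+11].map (fun note => PySem.Int.mod note 12)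
  else
    [key, key+2, key+3, key+5, key+7, key+8, key+11].map (fun note => PySem.Int.mod note 12)

-- ===== PORT B =====
def key_to_scale_alt (key : Int) (kind : String) : List Int :=
  let steps : List Int := if kind == "major" then [2, 2, 1, 2, 2, 2] else [2, 1, 2, 2, 1, 3]
  let init : Int × List Int := (key, [PySem.Int.mod key 12])
  let result := steps.foldl
    (fun (st : Int × List Int) (step : Int) =>
      let running := st.1 + step
      (running, st.2 ++ [PySem.Int.mod running 12]))
    init
  result.2

-- ===== PRECONDITION & SPEC =====
def Spec_key_to_scale (key : Int) (kind : String) (out : List Int) : Prop := out = key_to_scale_alt key kind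
instance (key : Int) (kind : String) (out : List Int) : Decidable (Spec_key_to_scale key kind out) := by unfold Spec_key_to_scale; infer_instance

-- ===== CLAIM (what is proved, stated in full; the proofs are below) =====
def Claim_equal_key_to_scale : Prop := ∀ (key : Int) (kind : String), Dom_key_to_scale key kind → Spec_key_to_scale key kind (key_to_scale key kind)

-- ===== LEMMAS AND PROOFS =====

-- ===== VERDICT (by name: the statement is the Claim_ definition above) =====
theorem key_to_scale_spec : Claim_equal_key_to_scale := by
  intro key kind _
  unfold Spec_key_to_scale key_to_scale key_to_scale_alt
  by_cases h : kind == "major" <;>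
    simp [h, List.foldl] <;>
    refine ⟨by ring_nf, by ring_nf, by ring_nf, by ring_nf, by ring_nf⟩
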